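-- pv_equiv track=rewrite | github.com/eevdriet/advent-of-code | python/src/_2020/day_21_allergen_assessment.py | part1
-- ===== SOURCE A (Python) =====
-- from collections import Counter, defaultdict
--
-- Food = tuple[set[str], set[str]]
--
-- def part1(foods: list[Food]) -> int:
--     # Keep track of all ingredients and how often they appear
--     ingredients = set()
--     ingredient_counts = Counter()
--
--     # Keep track of which allergens are possible for each ingredient
--     allergen_ingredients = {}
--
--     for food_ingredients, allergens in foods:
--         # Register new ingredients and add to their count
--         ingredients |= food_ingredients
--         ingredient_counts.update(food_ingredients)
--
--         # Filter out ingredients that cannot be tied to specific allergens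
--         for allergen in allergens:
--             if allergen not in allergen_ingredients:
--                 allergen_ingredients[allergen] = set(food_ingredients)
--             else:
--                 allergen_ingredients[allergen] &= set(food_ingredients)
--
--     # Partition the ingredients based on whether they can contain allergens
--     has_allergens = {
--         ingredient
--         for ingredients in allergen_ingredients.values()
--         for ingredient in ingredients
--     }
--     has_no_allergens = ingredients - has_allergens
--
--     return sum(ingredient_counts[ingredient] for ingredient in has_no_allergens)
-- ===== SOURCE B (Python) =====
-- def part1(foods):
--     # Ingredient-centric brute force: an ingredient is suspicious iff some
--     # allergen is listed only by foods that all contain it; no intersection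
--     # sets or counters are built.
--     allergens = {a for _, als in foods for a in als}
--     seen = set()
--     total = 0
--     for ings, _ in foods:
--         for x in ings:
--             if x in seen:
--                 continue
--             seen.add(x)
--             suspicious = any(
--                 all(x in f_ings for f_ings, f_als in foods if a in f_als)
--                 for a in allergens
--             )
--             if not suspicious:
--                 total += sum(list(f_ings).count(x) for f_ings, _ in foods)
--     return total
-- ===== Notes on version B (the rewrite author's own statement) =====
-- stated objective: alternative
-- what changed: A builds a Counter and per-allergen running set intersections in one loop and sums counts over a set difference; B builds no intersection sets or counter at all: it decides each ingredient's safety directly with a nested quantifier test (is there an allergen such that every food listing it contains the ingredient?) and accumulates occurrence totals on the fly behind a seen-set.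
import Mathlib
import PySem

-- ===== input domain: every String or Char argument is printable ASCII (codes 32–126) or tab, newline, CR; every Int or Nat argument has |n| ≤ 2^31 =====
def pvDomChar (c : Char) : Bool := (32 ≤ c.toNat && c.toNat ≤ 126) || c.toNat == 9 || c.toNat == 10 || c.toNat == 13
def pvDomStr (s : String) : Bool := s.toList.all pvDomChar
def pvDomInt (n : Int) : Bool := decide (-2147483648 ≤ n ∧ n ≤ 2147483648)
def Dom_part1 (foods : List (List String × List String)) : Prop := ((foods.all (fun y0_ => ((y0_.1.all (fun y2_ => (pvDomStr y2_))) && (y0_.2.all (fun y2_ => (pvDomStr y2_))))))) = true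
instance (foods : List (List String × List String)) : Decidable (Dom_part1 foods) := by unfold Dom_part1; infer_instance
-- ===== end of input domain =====

-- B replaces A's data structures (Counter + per-allergen running intersections + set
-- difference) by a direct per-ingredient quantifier test with a seen-set accumulator.

-- ===== PORT A =====
-- single loop threading (ingredients, ingredient_counts, allergen_ingredients)
def part1 (foods : List (List String × List String)) : Int :=
  let st := foods.foldl
    (fun (st : PySem.Set String × PySem.Dict String Int × PySem.Dict String (PySem.Set String)) food =>
      let ingredients := PySem.Set.union st.1 food.1
      let counts := food.1.foldl (fun d x => d.modify x 0 (· + 1)) st.2.1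
      let ai := food.2.foldl (fun ai a =>
          if ai.contains a = false then ai.insert a (PySem.Set.ofList food.1)
          else ai.modify a PySem.Set.empty (fun s => PySem.Set.inter s (PySem.Set.ofList food.1))) st.2.2
      (ingredients, counts, ai))
    (PySem.Set.empty, PySem.Dict.empty, PySem.Dict.empty)
  let hasAllergens := st.2.2.values.foldl (fun acc s => s.foldl PySem.Set.add acc) PySem.Set.empty
  let hasNoAllergens := PySem.Set.diff st.1 hasAllergens
  (hasNoAllergens.map (fun i => st.2.1.getD i 0)).sum

-- ===== PORT B =====
-- suspicious = any(all(x in f_ings for f_ings, f_als in foods if a in f_als) for a in allergens)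
def part1AltSusp (foods : List (List String × List String)) (allergens : PySem.Set String) (x : String) : Bool :=
  allergens.any (fun a => ((foods.filter (fun f => f.2.contains a)).all (fun f => f.1.contains x)))

-- sum(list(f_ings).count(x) for f_ings, _ in foods)
def part1AltCnt (foods : List (List String × List String)) (x : String) : Int :=
  (foods.map (fun f => (PySem.List.count f.1 x : Int))).sum

def part1_alt (foods : List (List String × List String)) : Int :=
  let allergens := PySem.Set.ofList (foods.flatMap (fun f => f.2))
  let st := foods.foldl
    (fun (st : PySem.Set String × Int) food =>
      food.1.foldl
        (fun (st : PySem.Set String × Int) x =>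
          if PySem.Set.contains st.1 x then st
          else
            let seen := PySem.Set.add st.1 x
            if part1AltSusp foods allergens x then (seen, st.2)
            else (seen, st.2 + part1AltCnt foods x))
        st)
    (PySem.Set.empty, 0)
  st.2

-- ===== PRECONDITION & SPEC =====
def Spec_part1 (foods : List (List String × List String)) (out : Int) : Prop := out = part1_alt foods
instance (foods : List (List String × List String)) (out : Int) : Decidable (Spec_part1 foods out) := by unfold Spec_part1; infer_instance

-- ===== CLAIM =====
def Claim_equal_part1 : Prop := ∀ (foods : List (List String × List String)), Dom_part1 foods → Spec_part1 foods (part1 foods)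

-- ===== LEMMAS AND PROOFS =====

-- A's threaded state split into three standalone folds
def foldI (foods : List (List String × List String)) (s : PySem.Set String) : PySem.Set String :=
  foods.foldl (fun s food => PySem.Set.union s food.1) s

def foldC (foods : List (List String × List String)) (d : PySem.Dict String Int) : PySem.Dict String Int :=
  foods.foldl (fun d food => food.1.foldl (fun d x => d.modify x 0 (· + 1)) d) d

def stepD (ings : List String) (ai : PySem.Dict String (PySem.Set String)) (a : String) :
    PySem.Dict String (PySem.Set String) :=
  if ai.contains a = false then ai.insert a (PySem.Set.ofList ings)
  else ai.modify a PySem.Set.empty (fun s => PySem.Set.inter s (PySem.Set.ofList ings))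

def foldD (foods : List (List String × List String)) (ai : PySem.Dict String (PySem.Set String)) :
    PySem.Dict String (PySem.Set String) :=
  foods.foldl (fun ai food => food.2.foldl (stepD food.1) ai) ai

lemma splitA (foods : List (List String × List String))
    (I : PySem.Set String) (C : PySem.Dict String Int) (D : PySem.Dict String (PySem.Set String)) :
    foods.foldl
      (fun (st : PySem.Set String × PySem.Dict String Int × PySem.Dict String (PySem.Set String)) food =>
        (PySem.Set.union st.1 food.1,
         food.1.foldl (fun d x => d.modify x 0 (· + 1)) st.2.1,
         food.2.foldl (fun ai a =>
            if ai.contains a = false then ai.insert a (PySem.Set.ofList food.1)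
            else ai.modify a PySem.Set.empty (fun s => PySem.Set.inter s (PySem.Set.ofList food.1))) st.2.2))
      (I, C, D)
    = (foldI foods I, foldC foods C, foldD foods D) := by
  induction foods generalizing I C D with
  | nil => rfl
  | cons f t ih => simp [foldI, foldC, foldD] at *; exact ih _ _ _

-- the two semantic conditions both programs compute
def keyCond (L : List (List String × List String)) (a : String) : Prop := ∃ f ∈ L, a ∈ f.2
def valCond (L : List (List String × List String)) (a x : String) : Prop := ∀ f ∈ L, a ∈ f.2 → x ∈ f.1

-- invariant of A's allergen dict. done = allergens of the current food already processed
def AInvP (L : List (List String × List String)) (ings : List String) (done : List String)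
    (ai : PySem.Dict String (PySem.Set String)) : Prop :=
  ai.keys.Nodup ∧ (∀ a, a ∈ ai.keys ↔ (keyCond L a ∨ a ∈ done)) ∧
  (∀ a ∈ ai.keys, ∀ x, x ∈ ai.getD a PySem.Set.empty ↔ (valCond L a x ∧ (a ∈ done → x ∈ ings)))

def AInv (L : List (List String × List String)) (ai : PySem.Dict String (PySem.Set String)) : Prop :=
  ai.keys.Nodup ∧ (∀ a, a ∈ ai.keys ↔ keyCond L a) ∧
  (∀ a ∈ ai.keys, ∀ x, x ∈ ai.getD a PySem.Set.empty ↔ valCond L a x)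

lemma stepP (L : List (List String × List String)) (ings : List String) (done : List String)
    (a0 : String) (ai : PySem.Dict String (PySem.Set String)) (h : AInvP L ings done ai) :
    AInvP L ings (done ++ [a0]) (stepD ings ai a0) := by
  obtain ⟨hnd, hkey, hval⟩ := h
  by_cases hc : ai.contains a0 = false
  · -- a0 is a fresh key: A inserts set(ings)
    have hna : a0 ∉ ai.keys := fun hm => by
      rw [(PySem.Dict.contains_iff_mem_keys ai a0).mpr hm] at hc; cases hc
    have hkc : ¬ keyCond L a0 ∧ a0 ∉ done := by
      have := (hkey a0).not.mp hna
      push Not at this; exact this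
    have hkeys : (stepD ings ai a0).keys = ai.keys ++ [a0] := by
      rw [stepD, if_pos hc, PySem.Dict.keys_insert_of_not_contains ai _ hc]
    refine ⟨?_, ?_, ?_⟩
    · rw [hkeys]
      exact hnd.append (List.nodup_singleton a0) (by simpa [List.disjoint_singleton] using hna)
    · intro a
      rw [hkeys]
      simp only [List.mem_append, List.mem_singleton, hkey a]
      tauto
    · intro a ha x
      rw [hkeys] at ha
      rw [stepD, if_pos hc]
      by_cases hax : a = a0
      · subst hax
        rw [PySem.Dict.getD_insert_self]
        have hvac : valCond L a x := by
          intro f hf haf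
          exact absurd ⟨f, hf, haf⟩ hkc.1
        simp [PySem.Set.mem_ofList, hvac, hkc.2]
      · rw [PySem.Dict.getD_insert_of_ne ai _ _ hax]
        have ha' : a ∈ ai.keys := by
          rcases List.mem_append.mp ha with h | h
          · exact h
          · simp at h; exact absurd h hax
        rw [hval a ha' x]
        simp [hax]
  · -- a0 already a key: A intersects
    have hc' : ai.contains a0 = true := by cases hv : ai.contains a0; exact absurd hv hc; rfl
    have hina : a0 ∈ ai.keys := (PySem.Dict.contains_iff_mem_keys ai a0).mp hc'
    have hkeys : (stepD ings ai a0).keys = ai.keys := by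
      rw [stepD, if_neg hc, PySem.Dict.keys_modify ai a0 _ _,
          PySem.Dict.keys_insert_of_contains ai _ hc']
    refine ⟨hkeys ▸ hnd, ?_, ?_⟩
    · intro a
      rw [hkeys]
      rw [hkey a]
      simp only [List.mem_append, List.mem_singleton]
      constructor
      · rintro (h | h)
        · exact Or.inl h
        · exact Or.inr (Or.inl h)
      · rintro (h | h | h)
        · exact Or.inl h
        · exact Or.inr h
        · exact h ▸ ((hkey a0).mp hina)
    · intro a ha x
      rw [hkeys] at ha
      rw [stepD, if_neg hc]
      by_cases hax : a = a0
      · subst hax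
        rw [PySem.Dict.getD_modify_self, PySem.Set.mem_inter, hval a ha x,
            PySem.Set.mem_ofList]
        constructor
        · rintro ⟨⟨hv, _⟩, hi⟩
          exact ⟨hv, fun _ => hi⟩
        · rintro ⟨hv, hd⟩
          have hi : x ∈ ings := hd (by simp)
          exact ⟨⟨hv, fun _ => hi⟩, hi⟩
      · rw [PySem.Dict.getD_modify_of_ne ai _ _ hax, hval a ha x]
        simp [hax]

lemma foldP (L : List (List String × List String)) (ings : List String) (as' : List String)
    (done : List String) (ai : PySem.Dict String (PySem.Set String)) (h : AInvP L ings done ai) :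
    AInvP L ings (done ++ as') (as'.foldl (stepD ings) ai) := by
  induction as' generalizing done ai with
  | nil => simpa using h
  | cons a rest ih =>
    have := ih (done ++ [a]) _ (stepP L ings done a ai h)
    simpa using this

lemma foldD_inv (foods L : List (List String × List String))
    (ai : PySem.Dict String (PySem.Set String)) (h : AInv L ai) :
    AInv (L ++ foods) (foldD foods ai) := by
  induction foods generalizing L ai with
  | nil => simpa using h
  | cons f t ih =>
    have h0 : AInvP L f.1 [] ai := by
      obtain ⟨h1, h2, h3⟩ := h
      refine ⟨h1, fun a => by simp [h2 a], fun a ha x => ?_⟩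
      simp only [List.not_mem_nil, false_implies, and_true]
      exact h3 a ha x
    have h1 : AInvP L f.1 f.2 (f.2.foldl (stepD f.1) ai) := by
      simpa using foldP L f.1 f.2 [] ai h0
    have h2 : AInv (L ++ [f]) (f.2.foldl (stepD f.1) ai) := by
      obtain ⟨h1', h2', h3'⟩ := h1
      refine ⟨h1', fun a => ?_, fun a ha x => ?_⟩
      · rw [h2' a]; unfold keyCond; constructor
        · rintro (⟨f', hf', ha'⟩ | ha') 
          · exact ⟨f', by simp [hf'], ha'⟩
          · exact ⟨f, by simp, ha'⟩
        · rintro ⟨f', hf', ha'⟩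
          rcases List.mem_append.mp hf' with hf' | hf'
          · exact Or.inl ⟨f', hf', ha'⟩
          · simp at hf'; subst hf'; exact Or.inr ha'
      · rw [h3' a ha x]; constructor
        · rintro ⟨hv, hd⟩ f' hf' haf'
          rcases List.mem_append.mp hf' with hf' | hf'
          · exact hv f' hf' haf'
          · simp at hf'; subst hf'; exact hd haf'
        · intro hv
          exact ⟨fun f' hf' => hv f' (by simp [hf']), fun hd => hv f (by simp) hd⟩
    have := ih (L ++ [f]) _ h2
    simpa [foldD] using this

-- flatten the values of the allergen dict (A's has_allergens set)
lemma mem_flatten_fold (vals : List (PySem.Set String)) (acc : PySem.Set String) (x : String) :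
    x ∈ vals.foldl (fun acc s => s.foldl PySem.Set.add acc) acc ↔ x ∈ acc ∨ ∃ s ∈ vals, x ∈ s := by
  induction vals generalizing acc with
  | nil => simp
  | cons v t ih =>
    have hv := PySem.Set.mem_foldl_add (f := fun (b : String) => b) v acc x
    simp only [List.foldl_cons, ih]
    simp only at hv
    simp [hv]
    tauto

-- nested foldl over a flatMap is one foldl over the flat list
lemma foldl_flatMap {α β σ : Type} (g : α → List β) (f : σ → β → σ) (l : List α) (s : σ) :
    (l.flatMap g).foldl f s = l.foldl (fun s a => (g a).foldl f s) s := by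
  induction l generalizing s with
  | nil => rfl
  | cons a t ih => simp [List.foldl_append, ih]

-- per-food counts summed = count over the flat ingredient list
lemma cnt_flat (foods : List (List String × List String)) (x : String) :
    part1AltCnt foods x = ((foods.flatMap (fun f => f.1)).count x : Int) := by
  induction foods with
  | nil => simp [part1AltCnt]
  | cons f t ih => simp [part1AltCnt, List.count_append] at *; omega

-- the contribution of one distinct ingredient in B
def bContrib (foods : List (List String × List String)) (allergens : PySem.Set String) (x : String) : Int :=
  if part1AltSusp foods allergens x then 0 else part1AltCnt foods x

lemma bLoop (foods : List (List String × List String)) (allergens : PySem.Set String)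
    (l : List String) (S : PySem.Set String) (t : Int) :
    l.foldl
      (fun (st : PySem.Set String × Int) x =>
        if PySem.Set.contains st.1 x then st
        else
          if part1AltSusp foods allergens x then (PySem.Set.add st.1 x, st.2)
          else (PySem.Set.add st.1 x, st.2 + part1AltCnt foods x)) (S, t)
    = (PySem.Set.update S l,
       t + (((PySem.Set.ofList l).filter (fun y => !(PySem.Set.contains S y))).map
              (bContrib foods allergens)).sum) := by
  induction l generalizing S t with
  | nil => simp [PySem.Set.update]
  | cons x l ih =>
    have hcadd : ∀ (T : PySem.Set String) (z y : String),
        PySem.Set.contains (PySem.Set.add T z) y = (PySem.Set.contains T y || y == z) := by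
      intro T z y
      rw [Bool.eq_iff_iff]
      simp [PySem.Set.mem_add]
    by_cases hmem : x ∈ S
    · have hcs : PySem.Set.contains S x = true := (PySem.Set.contains_iff S x).mpr hmem
      rw [List.foldl_cons]
      simp only [hcs, if_true]
      rw [ih S t]
      have hupd : PySem.Set.update S (x :: l) = PySem.Set.update S l := by
        rw [PySem.Set.update_cons, PySem.Set.add_of_mem hmem]
      have hfil : (PySem.Set.ofList (x :: l)).filter (fun y => !(PySem.Set.contains S y))
          = (PySem.Set.ofList l).filter (fun y => !(PySem.Set.contains S y)) := by
        rw [PySem.Set.ofList_cons]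
        simp only [List.filter_cons, hcs, Bool.not_true, PySem.Set.discard, List.filter_filter]
        apply List.filter_congr
        intro y hy
        by_cases hyx : y = x
        · subst hyx
          simp [hmem]
        · simp [hyx]
      rw [hupd, hfil]
    · have hcs : PySem.Set.contains S x = false := by
        cases hv : PySem.Set.contains S x
        · rfl
        · exact absurd ((PySem.Set.contains_iff S x).mp hv) hmem
      rw [List.foldl_cons]
      simp only [hcs, Bool.false_eq_true, if_false]
      have hstep : (if part1AltSusp foods allergens x then (PySem.Set.add S x, t)
          else (PySem.Set.add S x, t + part1AltCnt foods x))
          = (PySem.Set.add S x, t + bContrib foods allergens x) := by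
        by_cases hs : part1AltSusp foods allergens x <;> simp [bContrib, hs]
      rw [hstep, ih (PySem.Set.add S x) (t + bContrib foods allergens x)]
      have hupd : PySem.Set.update S (x :: l) = PySem.Set.update (PySem.Set.add S x) l :=
        PySem.Set.update_cons S x l
      have hfil : (PySem.Set.ofList (x :: l)).filter (fun y => !(PySem.Set.contains S y))
          = x :: (PySem.Set.ofList l).filter (fun y => !(PySem.Set.contains (PySem.Set.add S x) y)) := by
        rw [PySem.Set.ofList_cons]
        simp only [List.filter_cons, hcs, Bool.not_false, if_true,
          PySem.Set.discard, List.filter_filter]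
        congr 1
        apply List.filter_congr
        intro y hy
        rw [hcadd S x y]
        by_cases hyx : y = x
        · subst hyx
          simp
        · simp
      rw [hupd, hfil]
      simp only [List.map_cons, List.sum_cons]
      rw [add_assoc]

-- filtered-map sum as an if-sum over the whole list
lemma sum_filter_map (l : List String) (p : String → Bool) (g : String → Int) :
    ((l.filter p).map g).sum = (l.map (fun x => if p x then g x else 0)).sum := by
  induction l with
  | nil => rfl
  | cons a t ih => by_cases h : p a <;> simp [h, ih]

-- B's whole computation as a sum of contributions over the distinct flat ingredient list
lemma part1_alt_eq (foods : List (List String × List String)) :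
    part1_alt foods
      = ((PySem.Set.ofList (foods.flatMap (fun f => f.1))).map
          (bContrib foods (PySem.Set.ofList (foods.flatMap (fun f => f.2))))).sum := by
  show ((foods.foldl
      (fun (st : PySem.Set String × Int) food =>
        food.1.foldl
          (fun (st : PySem.Set String × Int) x =>
            if PySem.Set.contains st.1 x then st
            else
              if part1AltSusp foods (PySem.Set.ofList (foods.flatMap (fun f => f.2))) x then
                (PySem.Set.add st.1 x, st.2)
              else (PySem.Set.add st.1 x, st.2 + part1AltCnt foods x))
          st)
      (PySem.Set.empty, 0)).2) = _
  rw [← foldl_flatMap (fun f => f.1)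
    (fun (st : PySem.Set String × Int) x =>
      if PySem.Set.contains st.1 x then st
      else
        if part1AltSusp foods (PySem.Set.ofList (foods.flatMap (fun f => f.2))) x then
          (PySem.Set.add st.1 x, st.2)
        else (PySem.Set.add st.1 x, st.2 + part1AltCnt foods x))
    foods (PySem.Set.empty, 0)]
  rw [bLoop foods _ (foods.flatMap (fun f => f.1)) PySem.Set.empty 0]
  simp [PySem.Set.empty]

-- A's result via the three split folds
lemma part1_eq (foods : List (List String × List String)) :
    part1 foods =
      ((PySem.Set.diff (foldI foods PySem.Set.empty)
          ((foldD foods PySem.Dict.empty).values.foldl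
            (fun acc s => s.foldl PySem.Set.add acc) PySem.Set.empty)).map
        (fun i => (foldC foods PySem.Dict.empty).getD i 0)).sum := by
  unfold part1
  rw [splitA]

lemma foldI_eq (foods : List (List String × List String)) :
    foldI foods PySem.Set.empty = PySem.Set.ofList (foods.flatMap (fun f => f.1)) := by
  show foods.foldl (fun s f => f.1.foldl PySem.Set.add s) PySem.Set.empty = _
  rw [← foldl_flatMap (fun f => f.1) PySem.Set.add foods PySem.Set.empty]
  rfl

lemma foldC_getD (foods : List (List String × List String)) (x : String) :
    (foldC foods PySem.Dict.empty).getD x 0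
      = (((foods.flatMap (fun f => f.1)).count x : Nat) : Int) := by
  have : foldC foods PySem.Dict.empty
      = (foods.flatMap (fun f => f.1)).foldl (fun d y => d.modify y 0 (· + 1)) PySem.Dict.empty := by
    unfold foldC
    rw [foldl_flatMap (fun f => f.1) (fun d y => PySem.Dict.modify d y 0 (· + 1)) foods PySem.Dict.empty]
  rw [this, PySem.Dict.getD_foldl_modify_add_one]
  simp

-- ===== VERDICT =====
theorem part1_spec : Claim_equal_part1 := by
  intro foods _
  show part1 foods = part1_alt foods
  rw [part1_eq, part1_alt_eq]
  have hinv : AInv foods (foldD foods PySem.Dict.empty) := by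
    have h0 : AInv [] PySem.Dict.empty := by
      refine ⟨by simp [PySem.Dict.keys_empty], fun a => ?_, fun a ha x => ?_⟩
      · simp [PySem.Dict.keys_empty, keyCond]
      · simp [PySem.Dict.keys_empty] at ha
    simpa using foldD_inv foods [] PySem.Dict.empty h0
  obtain ⟨hnd, hkey, hval⟩ := hinv
  have hH : ∀ x : String,
      (x ∈ (foldD foods PySem.Dict.empty).values.foldl
          (fun acc s => s.foldl PySem.Set.add acc) PySem.Set.empty)
        ↔ ∃ a, keyCond foods a ∧ valCond foods a x := by
    intro x
    rw [mem_flatten_fold,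
        PySem.Dict.values_eq_map_keys _ hnd PySem.Set.empty]
    simp only [PySem.Set.empty, List.not_mem_nil, false_or, List.mem_map]
    constructor
    · rintro ⟨s, ⟨a, ha, rfl⟩, hx⟩
      exact ⟨a, (hkey a).mp ha, (hval a ha x).mp hx⟩
    · rintro ⟨a, hka, hv⟩
      have ha : a ∈ (foldD foods PySem.Dict.empty).keys := (hkey a).mpr hka
      exact ⟨_, ⟨a, ha, rfl⟩, (hval a ha x).mpr hv⟩
  have hSusp : ∀ x : String,
      part1AltSusp foods (PySem.Set.ofList (foods.flatMap (fun f => f.2))) x = true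
        ↔ ∃ a, keyCond foods a ∧ valCond foods a x := by
    intro x
    unfold part1AltSusp
    simp only [List.any_eq_true, List.all_eq_true, List.mem_filter,
      PySem.Set.mem_ofList, List.mem_flatMap]
    constructor
    · rintro ⟨a, ⟨f, hf, haf⟩, hall⟩
      refine ⟨a, ⟨f, hf, haf⟩, fun f' hf' haf' => ?_⟩
      have := hall f' ⟨hf', by simpa using haf'⟩
      simpa using this
    · rintro ⟨a, hk, hv⟩
      refine ⟨a, by simpa [keyCond] using hk, fun f' hf' => ?_⟩
      obtain ⟨hf', haf'⟩ := hf'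
      simpa using hv f' hf' (by simpa using haf')
  have hfil : PySem.Set.diff (foldI foods PySem.Set.empty)
      ((foldD foods PySem.Dict.empty).values.foldl
        (fun acc s => s.foldl PySem.Set.add acc) PySem.Set.empty)
      = (PySem.Set.ofList (foods.flatMap (fun f => f.1))).filter
          (fun y => !(part1AltSusp foods (PySem.Set.ofList (foods.flatMap (fun f => f.2))) y)) := by
    rw [PySem.Set.diff, foldI_eq]
    apply List.filter_congr
    intro y _
    congr 1
    rw [Bool.eq_iff_iff, PySem.Set.contains_iff]
    rw [hH y, ← hSusp y]
  rw [hfil, sum_filter_map]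
  apply congrArg
  apply List.map_congr_left
  intro y _
  rw [foldC_getD]
  unfold bContrib
  rw [cnt_flat foods y]
  by_cases hs : part1AltSusp foods (PySem.Set.ofList (foods.flatMap (fun f => f.2))) y = true
  · simp [hs]
  · simp [hs]
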